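-- pv_equiv track=rewrite | github.com/qingvist/cloud_hunter_cn | app.py | process_history_data
-- ===== SOURCE A (Python) =====
-- def calculate_tier_from_score(score):
--     if score <= 10: return "N"
--     if score <= 29: return "R"
--     if score <= 39: return "SR"
--     if score <= 49: return "SSR"
--     return "UR"
--
-- def process_history_data(raw_data):
--     if not raw_data: return 0, 0, 0, {"UR":0,"SSR":0,"SR":0,"R":0,"N":0}, {}, set()
--     cloud_map = {}
--     total_score = 0
--     collected_names = set()
--     for row in raw_data:
--         c_name = row[1]
--         c_score = row[3]
--         collected_names.add(c_name)
--         if c_name not in cloud_map: cloud_map[c_name] = []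
--         cloud_map[c_name].append(row)
--         total_score += c_score
--     tiers_data = {"UR": {}, "SSR": {}, "SR": {}, "R": {}, "N": {}}
--     tier_counts = {"UR": 0, "SSR": 0, "SR": 0, "R": 0, "N": 0}
--     for c_name, records in cloud_map.items():
--         best_record = max(records, key=lambda x: x[3])
--         best_score = best_record[3]
--         real_tier = calculate_tier_from_score(best_score)
--         if real_tier in tiers_data:
--             tiers_data[real_tier][c_name] = records
--             tier_counts[real_tier] += 1
--     unique_count = len(cloud_map)
--     total_obs = len(raw_data)
--     return total_score, total_obs, unique_count, tier_counts, tiers_data, collected_names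
-- ===== SOURCE B (Python) =====
-- def calculate_tier_from_score(score):
--     if score <= 10: return "N"
--     if score <= 29: return "R"
--     if score <= 39: return "SR"
--     if score <= 49: return "SSR"
--     return "UR"
--
-- TIER_NAMES = ("UR", "SSR", "SR", "R", "N")
--
-- def group_tier(records):
--     return calculate_tier_from_score(max(r[3] for r in records))
--
-- def process_history_data(raw_data):
--     if not raw_data:
--         return 0, 0, 0, {"UR": 0, "SSR": 0, "SR": 0, "R": 0, "N": 0}, {}, set()
--     names = list(dict.fromkeys(r[1] for r in raw_data))
--     groups = [(n, [r for r in raw_data if r[1] == n]) for n in names]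
--     tiers_data = {t: {n: recs for n, recs in groups if group_tier(recs) == t}
--                   for t in TIER_NAMES}
--     tier_counts = {t: len(d) for t, d in tiers_data.items()}
--     total_score = sum(r[3] for r in raw_data)
--     return total_score, len(raw_data), len(names), tier_counts, tiers_data, set(names)
-- ===== Notes on version B (the rewrite author's own statement) =====
-- stated objective: alternative
-- what changed: B replaces A's dict-grouping loop plus per-group max() rescan and tier-bucketing loop by staged comprehensions: dedup the names, build each group by filtering raw_data, and build each tier bucket by filtering the groups on their recomputed best-score tier.
import Mathlib
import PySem

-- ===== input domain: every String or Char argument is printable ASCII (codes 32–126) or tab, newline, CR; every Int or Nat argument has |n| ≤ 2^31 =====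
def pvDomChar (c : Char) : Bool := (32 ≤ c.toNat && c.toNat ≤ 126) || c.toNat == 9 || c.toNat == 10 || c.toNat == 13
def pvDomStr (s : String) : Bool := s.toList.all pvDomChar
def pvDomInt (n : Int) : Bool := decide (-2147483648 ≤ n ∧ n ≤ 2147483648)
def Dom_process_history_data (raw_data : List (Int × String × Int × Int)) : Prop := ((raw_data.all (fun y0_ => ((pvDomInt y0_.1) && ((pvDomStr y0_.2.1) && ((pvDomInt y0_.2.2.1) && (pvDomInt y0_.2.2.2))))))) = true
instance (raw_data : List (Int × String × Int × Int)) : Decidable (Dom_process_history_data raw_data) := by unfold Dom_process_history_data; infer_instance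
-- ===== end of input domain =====

-- B replaces A's imperative dict-grouping loop (plus a per-group max() rescan and a bucketing
-- loop) by staged comprehensions: dedup the names, build each group by filtering raw_data,
-- and build each tier bucket by filtering the groups on their best-score tier
-- (objective: alternative decomposition, not claimed faster).
-- Dicts/sets are returned as lists per the type convention; equivalence is about return values.

abbrev PvRow := Int × String × Int × Int

def calculate_tier_from_score (score : Int) : String :=
  if score ≤ 10 then "N"
  else if score ≤ 29 then "R"
  else if score ≤ 39 then "SR"
  else if score ≤ 49 then "SSR"
  else "UR"

-- ===== PORT A =====

-- body of A's first loop: state (cloud_map, total_score, collected_names)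
def pvStepA1 (st : PySem.Dict String (List PvRow) × Int × PySem.Set String) (row : PvRow) :
    PySem.Dict String (List PvRow) × Int × PySem.Set String :=
  let c_name := row.2.1
  let c_score := row.2.2.2
  let cn := PySem.Set.add st.2.2 c_name
  let cm := if st.1.contains c_name then st.1 else st.1.insert c_name []
  -- cloud_map[c_name].append(row); the key is always present here, so modify is exact
  let cm := cm.modify c_name [] (fun rs => rs ++ [row])
  (cm, st.2.1 + c_score, cn)

-- body of A's second loop: state (tiers_data, tier_counts)
def pvStepA2 (st : PySem.Dict String (PySem.Dict String (List PvRow)) × PySem.Dict String Int)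
    (p : String × List PvRow) :
    PySem.Dict String (PySem.Dict String (List PvRow)) × PySem.Dict String Int :=
  match PySem.List.max? p.2 (fun r => r.2.2.2) with
  | none => st  -- unreachable: every group holds at least one record (max() never sees [])
  | some best_record =>
    let real_tier := calculate_tier_from_score best_record.2.2.2
    if st.1.contains real_tier then
      (st.1.modify real_tier PySem.Dict.empty (fun d => d.insert p.1 p.2),
       st.2.modify real_tier 0 (· + 1))
    else st

def process_history_data (raw_data : List PvRow) :
    Int × Int × Int × (List (String × Int)) × (List (String × List (String × List PvRow))) × List String :=
  if raw_data = [] then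
    (0, 0, 0, [("UR", 0), ("SSR", 0), ("SR", 0), ("R", 0), ("N", 0)], [], [])
  else
    let s1 := raw_data.foldl pvStepA1 (PySem.Dict.empty, 0, PySem.Set.empty)
    let cloud_map := s1.1
    let tiers0 : PySem.Dict String (PySem.Dict String (List PvRow)) :=
      PySem.Dict.ofList [("UR", PySem.Dict.empty), ("SSR", PySem.Dict.empty),
        ("SR", PySem.Dict.empty), ("R", PySem.Dict.empty), ("N", PySem.Dict.empty)]
    let counts0 : PySem.Dict String Int :=
      PySem.Dict.ofList [("UR", 0), ("SSR", 0), ("SR", 0), ("R", 0), ("N", 0)]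
    let s2 := cloud_map.items.foldl pvStepA2 (tiers0, counts0)
    (s1.2.1, (raw_data.length : Int), (cloud_map.size : Int), s2.2.items,
     s2.1.items.map (fun q => (q.1, q.2.items)), s1.2.2)

-- ===== PORT B =====

-- group_tier(records) = calculate_tier_from_score(max(r[3] for r in records))
def pvGroupTier (records : List PvRow) : String :=
  match PySem.List.max? (records.map (fun r => r.2.2.2)) (fun x => x) with
  | some m => calculate_tier_from_score m
  | none => ""  -- unreachable: group_tier is only applied to nonempty groups

def process_history_data_alt (raw_data : List PvRow) :
    Int × Int × Int × (List (String × Int)) × (List (String × List (String × List PvRow))) × List String :=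
  if raw_data = [] then
    (0, 0, 0, [("UR", 0), ("SSR", 0), ("SR", 0), ("R", 0), ("N", 0)], [], [])
  else
    -- names = list(dict.fromkeys(r[1] for r in raw_data))
    let names := PySem.List.dedup (raw_data.map (fun r => r.2.1))
    -- groups = [(n, [r for r in raw_data if r[1] == n]) for n in names]
    let groups := names.map (fun n => (n, raw_data.filter (fun r => r.2.1 == n)))
    -- dict comprehensions over distinct keys, ported as maps building the association lists
    let tiers_data := ["UR", "SSR", "SR", "R", "N"].map
      (fun t => (t, groups.filter (fun p => pvGroupTier p.2 == t)))
    let tier_counts := tiers_data.map (fun q => (q.1, (q.2.length : Int)))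
    let total_score := (raw_data.map (fun r => r.2.2.2)).sum
    (total_score, (raw_data.length : Int), (names.length : Int), tier_counts, tiers_data,
     PySem.Set.ofList names)

-- ===== PRECONDITION & SPEC =====
def Spec_process_history_data (raw_data : List (Int × String × Int × Int)) (out : Int × Int × Int × (List (String × Int)) × (List (String × List (String × List (Int × String × Int × Int)))) × List String) : Prop := out = process_history_data_alt raw_data
instance (raw_data : List (Int × String × Int × Int)) (out : Int × Int × Int × (List (String × Int)) × (List (String × List (String × List (Int × String × Int × Int)))) × List String) : Decidable (Spec_process_history_data raw_data out) := by
  unfold Spec_process_history_data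
  -- the nested-product DecidableEq is assembled stepwise (one-shot synthesis exceeds the search limit)
  letI dRow : DecidableEq (Int × String × Int × Int) := inferInstance
  letI dLRow : DecidableEq (List (Int × String × Int × Int)) := inferInstance
  letI d1 : DecidableEq (String × List (Int × String × Int × Int)) := inferInstance
  letI d2 : DecidableEq (List (String × List (Int × String × Int × Int))) := inferInstance
  letI d3 : DecidableEq (String × List (String × List (Int × String × Int × Int))) := inferInstance
  letI d4 : DecidableEq (List (String × List (String × List (Int × String × Int × Int)))) := inferInstance
  letI d5 : DecidableEq (List (String × Int)) := inferInstance
  letI d6 : DecidableEq (List String) := inferInstance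
  infer_instance

-- ===== CLAIM (what is proved, stated in full; the proofs are below) =====
def Claim_equal_process_history_data : Prop := ∀ (raw_data : List (Int × String × Int × Int)), Dom_process_history_data raw_data → Spec_process_history_data raw_data (process_history_data raw_data)

-- ===== LEMMAS AND PROOFS =====

-- score of the first-occurrence maximum of a (nonempty) group
def pvMaxS (rs : List PvRow) : Int :=
  match rs with
  | [] => 0
  | r :: t => (t.map (fun x => x.2.2.2)).foldl max r.2.2.2

lemma pvMaxS_key_of_max? {rs : List PvRow} {m : PvRow}
    (h : PySem.List.max? rs (fun r => r.2.2.2) = some m) : m.2.2.2 = pvMaxS rs := by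
  have hm := PySem.List.max?_mem h
  have hmax := PySem.List.max?_isMax h
  cases rs with
  | nil => cases hm
  | cons r t =>
    have hub := PySem.List.le_foldl_max (t.map (fun x => x.2.2.2)) r.2.2.2
    have hmem := PySem.List.foldl_max_mem (t.map (fun x => x.2.2.2)) r.2.2.2
    apply le_antisymm
    · rcases List.mem_cons.mp hm with hm | hm
      · rw [hm]; exact hub.1
      · exact hub.2 _ (List.mem_map_of_mem hm)
    · rcases hmem with he | he
      · rw [pvMaxS, he]; exact hmax r (by simp)
      · rcases List.mem_map.mp he with ⟨y, hy, hey⟩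
        rw [pvMaxS, ← hey]; exact hmax y (by simp [hy])

lemma pvGroupTier_of_max? {rs : List PvRow} {m : PvRow}
    (h : PySem.List.max? rs (fun r => r.2.2.2) = some m) :
    pvGroupTier rs = calculate_tier_from_score m.2.2.2 := by
  cases rs with
  | nil => simp [PySem.List.max?] at h
  | cons r t =>
    rw [pvMaxS_key_of_max? h]
    simp [pvGroupTier, PySem.List.max?_id_cons, pvMaxS]

-- loop-1 characterisation: keys in first-occurrence order, each group is a filter of the
-- input, the score sum and the collected names accumulate
lemma pvLoop1_spec (l : List PvRow) :
    ∀ (cm : PySem.Dict String (List PvRow)) (ts : Int) (cn : PySem.Set String),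
    cm.keys.Nodup →
    (l.foldl pvStepA1 (cm, ts, cn)).1.keys = PySem.Set.update cm.keys (l.map (fun r => r.2.1)) ∧
    (∀ n, (l.foldl pvStepA1 (cm, ts, cn)).1.getD n []
        = cm.getD n [] ++ l.filter (fun r => r.2.1 == n)) ∧
    (l.foldl pvStepA1 (cm, ts, cn)).2.1 = ts + (l.map (fun r => r.2.2.2)).sum ∧
    (l.foldl pvStepA1 (cm, ts, cn)).2.2 = PySem.Set.update cn (l.map (fun r => r.2.1)) := by
  induction l with
  | nil =>
    intro cm ts cn _
    refine ⟨?_, ?_, ?_, ?_⟩ <;> simp [PySem.Set.update_nil]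
  | cons x t ih =>
    intro cm ts cn hnd
    have hstep : pvStepA1 (cm, ts, cn) x
        = ((if cm.contains x.2.1 then cm else cm.insert x.2.1 []).modify x.2.1 []
             (fun rs => rs ++ [x]),
           ts + x.2.2.2, PySem.Set.add cn x.2.1) := rfl
    have hkeys1 : ((if cm.contains x.2.1 then cm else cm.insert x.2.1 []).modify x.2.1 []
        (fun rs => rs ++ [x])).keys = PySem.Set.add cm.keys x.2.1 := by
      rw [PySem.Dict.keys_modify]
      cases hc : cm.contains x.2.1 with
      | true =>
        simp only [if_true]
        rw [PySem.Dict.keys_insert_of_contains cm _ hc, PySem.Set.add_eq_ite, if_pos]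
        exact (PySem.Dict.contains_iff_mem_keys cm x.2.1).mp hc
      | false =>
        simp only [Bool.false_eq_true, if_false]
        rw [PySem.Dict.keys_insert_of_contains _ _ (PySem.Dict.contains_insert_self cm x.2.1 []),
          PySem.Dict.keys_insert_of_not_contains cm _ hc, PySem.Set.add_eq_ite, if_neg]
        intro hmem
        rw [(PySem.Dict.contains_iff_mem_keys cm x.2.1).mpr hmem] at hc
        cases hc
    have hnodup1 : ((if cm.contains x.2.1 then cm else cm.insert x.2.1 []).modify x.2.1 []
        (fun rs => rs ++ [x])).keys.Nodup := by
      rw [hkeys1]; exact PySem.Set.nodup_add cm.keys x.2.1 hnd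
    have hinner : ∀ n, (if cm.contains x.2.1 then cm else cm.insert x.2.1 []).getD n []
        = cm.getD n [] := by
      intro n
      cases hc : cm.contains x.2.1 with
      | true => simp
      | false =>
        simp only [Bool.false_eq_true, if_false]
        rw [PySem.Dict.getD_insert]
        split_ifs with h
        · rw [h, PySem.Dict.getD_of_not_contains cm [] hc]
        · rfl
    have hgetD1 : ∀ n, ((if cm.contains x.2.1 then cm else cm.insert x.2.1 []).modify x.2.1 []
        (fun rs => rs ++ [x])).getD n []
        = cm.getD n [] ++ (if x.2.1 == n then [x] else []) := by
      intro n
      rw [PySem.Dict.getD_modify]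
      by_cases h : n = x.2.1
      · subst h; simp [hinner]
      · simp [h, Ne.symm h, hinner]
    obtain ⟨ik, ig, is, ic⟩ := ih _ (ts + x.2.2.2) (PySem.Set.add cn x.2.1) hnodup1
    refine ⟨?_, ?_, ?_, ?_⟩
    · rw [List.foldl_cons, hstep, ik, hkeys1, List.map_cons, PySem.Set.update_cons]
    · intro n
      rw [List.foldl_cons, hstep, ig n, hgetD1 n, List.filter_cons]
      by_cases h : x.2.1 = n
      · simp [h, List.append_assoc]
      · simp [h]
    · rw [List.foldl_cons, hstep, is, List.map_cons, List.sum_cons]; ring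
    · rw [List.foldl_cons, hstep, ic, List.map_cons, PySem.Set.update_cons]

-- loop-2 characterisation: each tier bucket accumulates the groups whose best-score tier is
-- that bucket's key, each counter accumulates their number; keys are unchanged
lemma pvLoop2_spec (l : List (String × List PvRow)) :
    ∀ (D : PySem.Dict String (PySem.Dict String (List PvRow))) (C : PySem.Dict String Int),
    (∀ p ∈ l, p.2 ≠ []) →
    (∀ s : Int, D.contains (calculate_tier_from_score s) = true) →
    (∀ s : Int, C.contains (calculate_tier_from_score s) = true) →
    (l.foldl pvStepA2 (D, C)).1.keys = D.keys ∧
    (l.foldl pvStepA2 (D, C)).2.keys = C.keys ∧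
    (∀ tn, (l.foldl pvStepA2 (D, C)).1.getD tn PySem.Dict.empty
        = (l.filter (fun p => pvGroupTier p.2 == tn)).foldl
            (fun d p => d.insert p.1 p.2) (D.getD tn PySem.Dict.empty)) ∧
    (∀ tn, (l.foldl pvStepA2 (D, C)).2.getD tn 0
        = C.getD tn 0 + ((l.filter (fun p => pvGroupTier p.2 == tn)).length : Int)) := by
  induction l with
  | nil =>
    intro D C _ _ _
    refine ⟨rfl, rfl, fun tn => rfl, fun tn => by simp⟩
  | cons p t ih =>
    intro D C hne hD hC
    obtain ⟨m, hm⟩ : ∃ m, PySem.List.max? p.2 (fun r => r.2.2.2) = some m := by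
      cases hmm : PySem.List.max? p.2 (fun r => r.2.2.2) with
      | none => exact absurd ((PySem.List.max?_eq_none_iff _ _).mp hmm) (hne p (by simp))
      | some m => exact ⟨m, rfl⟩
    have htier : calculate_tier_from_score m.2.2.2 = pvGroupTier p.2 :=
      (pvGroupTier_of_max? hm).symm
    have hcont : D.contains (pvGroupTier p.2) = true := htier ▸ hD m.2.2.2
    have hstep : pvStepA2 (D, C) p
        = (D.modify (pvGroupTier p.2) PySem.Dict.empty (fun d => d.insert p.1 p.2),
           C.modify (pvGroupTier p.2) 0 (· + 1)) := by
      simp only [pvStepA2, hm, htier, hcont, if_true]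
    have hD' : ∀ s : Int,
        (D.modify (pvGroupTier p.2) PySem.Dict.empty (fun d => d.insert p.1 p.2)).contains
          (calculate_tier_from_score s) = true := by
      intro s
      rw [PySem.Dict.contains_modify]
      simp [hD s]
    have hDk : (D.modify (pvGroupTier p.2) PySem.Dict.empty
        (fun d => d.insert p.1 p.2)).keys = D.keys := by
      rw [PySem.Dict.keys_modify, PySem.Dict.keys_insert_of_contains _ _ hcont]
    have hCcont : C.contains (pvGroupTier p.2) = true := htier ▸ hC m.2.2.2
    have hC' : ∀ s : Int,
        (C.modify (pvGroupTier p.2) 0 (· + 1)).contains (calculate_tier_from_score s) = true := by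
      intro s
      rw [PySem.Dict.contains_modify]
      simp [hC s]
    have hCk : (C.modify (pvGroupTier p.2) 0 (· + 1)).keys = C.keys := by
      rw [PySem.Dict.keys_modify, PySem.Dict.keys_insert_of_contains _ _ hCcont]
    obtain ⟨ik, ikc, igD, igC⟩ := ih _ _ (fun q hq => hne q (by simp [hq])) hD' hC'
    refine ⟨?_, ?_, ?_, ?_⟩
    · rw [List.foldl_cons, hstep, ik, hDk]
    · rw [List.foldl_cons, hstep, ikc, hCk]
    · intro tn
      rw [List.foldl_cons, hstep, igD tn, PySem.Dict.getD_modify, List.filter_cons]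
      by_cases h : pvGroupTier p.2 = tn
      · subst h; simp
      · simp [h, Ne.symm h]
    · intro tn
      rw [List.foldl_cons, hstep, igC tn, PySem.Dict.getD_modify, List.filter_cons]
      by_cases h : pvGroupTier p.2 = tn
      · subst h; simp; ring
      · simp [h, Ne.symm h]

-- the five fixed tier keys contain every computed tier
lemma pvTiers0_contains (s : Int) :
    (PySem.Dict.ofList [("UR", (PySem.Dict.empty : PySem.Dict String (List PvRow))),
      ("SSR", PySem.Dict.empty), ("SR", PySem.Dict.empty), ("R", PySem.Dict.empty),
      ("N", PySem.Dict.empty)]).contains (calculate_tier_from_score s) = true := by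
  unfold calculate_tier_from_score
  split_ifs <;> decide

lemma pvCounts0_contains (s : Int) :
    (PySem.Dict.ofList [("UR", (0 : Int)), ("SSR", 0), ("SR", 0), ("R", 0),
      ("N", 0)]).contains (calculate_tier_from_score s) = true := by
  unfold calculate_tier_from_score
  split_ifs <;> decide

-- the whole nonempty case, with the let-bound state written out
lemma pvMain (raw : List PvRow) :
    ((raw.foldl pvStepA1 (PySem.Dict.empty, 0, PySem.Set.empty)).2.1,
     (raw.length : Int),
     (((raw.foldl pvStepA1 (PySem.Dict.empty, 0, PySem.Set.empty)).1.size : Nat) : Int),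
     ((raw.foldl pvStepA1 (PySem.Dict.empty, 0, PySem.Set.empty)).1.items.foldl pvStepA2
        (PySem.Dict.ofList [("UR", PySem.Dict.empty), ("SSR", PySem.Dict.empty),
          ("SR", PySem.Dict.empty), ("R", PySem.Dict.empty), ("N", PySem.Dict.empty)],
         PySem.Dict.ofList [("UR", 0), ("SSR", 0), ("SR", 0), ("R", 0), ("N", 0)])).2.items,
     ((raw.foldl pvStepA1 (PySem.Dict.empty, 0, PySem.Set.empty)).1.items.foldl pvStepA2
        (PySem.Dict.ofList [("UR", PySem.Dict.empty), ("SSR", PySem.Dict.empty),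
          ("SR", PySem.Dict.empty), ("R", PySem.Dict.empty), ("N", PySem.Dict.empty)],
         PySem.Dict.ofList [("UR", 0), ("SSR", 0), ("SR", 0), ("R", 0),
           ("N", 0)])).1.items.map (fun q => (q.1, q.2.items)),
     (raw.foldl pvStepA1 (PySem.Dict.empty, 0, PySem.Set.empty)).2.2)
    = (((raw.map (fun r => r.2.2.2)).sum : Int),
       (raw.length : Int),
       ((PySem.List.dedup (raw.map (fun r => r.2.1))).length : Int),
       (["UR", "SSR", "SR", "R", "N"].map (fun t =>
          (t, ((PySem.List.dedup (raw.map (fun r => r.2.1))).map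
                (fun n => (n, raw.filter (fun r => r.2.1 == n)))).filter
                (fun p => pvGroupTier p.2 == t)))).map (fun q => (q.1, (q.2.length : Int))),
       ["UR", "SSR", "SR", "R", "N"].map (fun t =>
          (t, ((PySem.List.dedup (raw.map (fun r => r.2.1))).map
                (fun n => (n, raw.filter (fun r => r.2.1 == n)))).filter
                (fun p => pvGroupTier p.2 == t))),
       PySem.Set.ofList (PySem.List.dedup (raw.map (fun r => r.2.1)))) := by
  obtain ⟨hk, hg, hs, hc⟩ := pvLoop1_spec raw PySem.Dict.empty 0 PySem.Set.empty
    (by rw [PySem.Dict.keys_empty]; exact List.nodup_nil)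
  have hnodup : (raw.foldl pvStepA1 (PySem.Dict.empty, 0, PySem.Set.empty)).1.keys.Nodup := by
    rw [hk, PySem.Dict.keys_empty, PySem.Set.update_nil_left]
    exact PySem.Set.nodup_ofList _
  have hkeysN : (raw.foldl pvStepA1 (PySem.Dict.empty, 0, PySem.Set.empty)).1.keys
      = PySem.List.dedup (raw.map (fun r => r.2.1)) := by
    rw [hk, PySem.Dict.keys_empty, PySem.Set.update_nil_left, PySem.List.dedup_eq_ofList]
  have hitems : (raw.foldl pvStepA1 (PySem.Dict.empty, 0, PySem.Set.empty)).1.items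
      = (PySem.List.dedup (raw.map (fun r => r.2.1))).map
          (fun n => (n, raw.filter (fun r => r.2.1 == n))) := by
    rw [PySem.Dict.items_eq_map_keys _ hnodup [], hkeysN]
    refine List.map_congr_left ?_
    intro n _
    rw [hg n, PySem.Dict.getD_empty, List.nil_append]
  have hne : ∀ p ∈ (raw.foldl pvStepA1 (PySem.Dict.empty, 0, PySem.Set.empty)).1.items,
      p.2 ≠ [] := by
    rw [hitems]
    intro p hp
    rcases List.mem_map.mp hp with ⟨n, hn, rfl⟩
    have hn' : n ∈ raw.map (fun r => r.2.1) := (PySem.List.mem_dedup _ _).mp hn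
    rcases List.mem_map.mp hn' with ⟨r, hr, rfl⟩
    intro hfil
    have hrf : r ∈ raw.filter (fun r' => r'.2.1 == r.2.1) :=
      List.mem_filter.mpr ⟨hr, by simp⟩
    have hfil' : raw.filter (fun r' => r'.2.1 == r.2.1) = [] := hfil
    rw [hfil'] at hrf
    cases hrf
  obtain ⟨hk2, hk2c, hgD, hgC⟩ := pvLoop2_spec
    (raw.foldl pvStepA1 (PySem.Dict.empty, 0, PySem.Set.empty)).1.items
    (PySem.Dict.ofList [("UR", PySem.Dict.empty), ("SSR", PySem.Dict.empty),
      ("SR", PySem.Dict.empty), ("R", PySem.Dict.empty), ("N", PySem.Dict.empty)])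
    (PySem.Dict.ofList [("UR", 0), ("SSR", 0), ("SR", 0), ("R", 0), ("N", 0)])
    hne pvTiers0_contains pvCounts0_contains
  simp only [hitems] at hgD hgC hk2 hk2c
  simp only [Prod.mk.injEq]
  refine ⟨?_, trivial, ?_, ?_, ?_, ?_⟩
  · -- total_score
    rw [hs, zero_add]
  · -- unique_count
    have h3 : (raw.foldl pvStepA1 (PySem.Dict.empty, 0, PySem.Set.empty)).1.size
        = (PySem.List.dedup (raw.map (fun r => r.2.1))).length := by
      have hdef : (raw.foldl pvStepA1 (PySem.Dict.empty, 0, PySem.Set.empty)).1.size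
          = (raw.foldl pvStepA1 (PySem.Dict.empty, 0, PySem.Set.empty)).1.items.length := rfl
      rw [hdef, hitems, List.length_map]
    exact_mod_cast congrArg (fun n : Nat => (n : Int)) h3
  · -- tier_counts
    have hnd2 : ((((PySem.List.dedup (raw.map (fun r => r.2.1))).map
        (fun n => (n, raw.filter (fun r => r.2.1 == n)))).foldl
        pvStepA2 (PySem.Dict.ofList [("UR", PySem.Dict.empty), ("SSR", PySem.Dict.empty),
          ("SR", PySem.Dict.empty), ("R", PySem.Dict.empty), ("N", PySem.Dict.empty)],
         PySem.Dict.ofList [("UR", 0), ("SSR", 0), ("SR", 0), ("R", 0), ("N", 0)])).2).keys.Nodup := by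
      rw [hk2c]; decide
    rw [hitems, PySem.Dict.items_eq_map_keys _ hnd2 0, hk2c]
    rw [List.map_map]
    refine List.map_congr_left ?_
    intro tn htn
    have hc0 : (PySem.Dict.ofList [("UR", (0 : Int)), ("SSR", 0), ("SR", 0), ("R", 0),
        ("N", 0)]).getD tn 0 = 0 := by
      fin_cases htn <;> rfl
    simp only [Function.comp]
    rw [hgC tn, hc0, zero_add]
  · -- tiers_data
    have hnd1 : ((((PySem.List.dedup (raw.map (fun r => r.2.1))).map
        (fun n => (n, raw.filter (fun r => r.2.1 == n)))).foldl
        pvStepA2 (PySem.Dict.ofList [("UR", PySem.Dict.empty), ("SSR", PySem.Dict.empty),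
          ("SR", PySem.Dict.empty), ("R", PySem.Dict.empty), ("N", PySem.Dict.empty)],
         PySem.Dict.ofList [("UR", 0), ("SSR", 0), ("SR", 0), ("R", 0), ("N", 0)])).1).keys.Nodup := by
      rw [hk2]; decide
    rw [hitems, PySem.Dict.items_eq_map_keys _ hnd1 PySem.Dict.empty, hk2]
    rw [List.map_map]
    refine List.map_congr_left ?_
    intro tn htn
    have ht0 : (PySem.Dict.ofList [("UR", (PySem.Dict.empty : PySem.Dict String (List PvRow))),
        ("SSR", PySem.Dict.empty), ("SR", PySem.Dict.empty), ("R", PySem.Dict.empty),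
        ("N", PySem.Dict.empty)]).getD tn PySem.Dict.empty = PySem.Dict.empty := by
      fin_cases htn <;> rfl
    have h1 : ((((PySem.List.dedup (raw.map (fun r => r.2.1))).map
        (fun n => (n, raw.filter (fun r => r.2.1 == n)))).map (fun p => p.1)).Nodup) := by
      rw [List.map_map]
      rw [show ((fun p : String × List PvRow => p.1) ∘
          fun n : String => (n, raw.filter (fun r => r.2.1 == n))) = id from rfl, List.map_id]
      exact PySem.List.nodup_dedup _
    have hndfil : (((((PySem.List.dedup (raw.map (fun r => r.2.1))).map
        (fun n => (n, raw.filter (fun r => r.2.1 == n)))).filter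
        (fun p => pvGroupTier p.2 == tn)).map (fun p => p.1)).Nodup) :=
      List.Nodup.sublist (List.Sublist.map _ List.filter_sublist) h1
    have hfresh := PySem.Dict.items_foldl_insert_fresh
      (((PySem.List.dedup (raw.map (fun r => r.2.1))).map
        (fun n => (n, raw.filter (fun r => r.2.1 == n)))).filter
        (fun p => pvGroupTier p.2 == tn))
      (fun p => p.1) (fun p => p.2) PySem.Dict.empty
      (fun a _ => rfl) hndfil
    simp only [Function.comp]
    rw [hgD tn, ht0, hfresh]
    simp [show (PySem.Dict.empty : PySem.Dict String (List PvRow)).items = [] from rfl]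
  · -- collected_names
    rw [hc]
    rw [show (PySem.Set.empty : PySem.Set String) = [] from rfl, PySem.Set.update_nil_left,
      PySem.List.dedup_eq_ofList, PySem.Set.ofList_ofList]

-- ===== VERDICT (by name: the statement is the Claim_ definition above) =====
theorem process_history_data_spec : Claim_equal_process_history_data := by
  intro raw _hdom
  show process_history_data raw = process_history_data_alt raw
  by_cases hnil : raw = []
  · rw [process_history_data, process_history_data_alt, if_pos hnil, if_pos hnil]
  · rw [process_history_data, process_history_data_alt, if_neg hnil, if_neg hnil]
    exact pvMain raw
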